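-- pv_equiv track=rewrite | github.com/tblock007/aoc | 2018/d5p2.py | reducedLength
-- ===== SOURCE A (Python) =====
-- def isMatch(c1, c2):
--     return (abs(ord(c1) - ord(c2)) == 32) # difference between 'A' and 'a'
--
-- def reducedLength(polymer, igOrdUpper):
--     stack = []
--     for c in polymer:
--         if c != chr(igOrdUpper) and c != chr(igOrdUpper + 32):
--             if len(stack) == 0 or not isMatch(stack[-1], c):
--                 stack.append(c)
--             else:
--                 stack.pop()
--     return len(stack)
-- ===== SOURCE B (Python) =====
-- def reducedLength(polymer, igOrdUpper):
--     # drop every ignored unit first, then repeatedly delete the leftmost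
--     # adjacent reacting pair until none remains
--     s = [c for c in polymer if c != chr(igOrdUpper) and c != chr(igOrdUpper + 32)]
--     while True:
--         found = -1
--         for i in range(len(s) - 1):
--             if abs(ord(s[i]) - ord(s[i + 1])) == 32:
--                 found = i
--                 break
--         if found < 0:
--             return len(s)
--         del s[found:found + 2]
-- ===== Notes on version B (the rewrite author's own statement) =====
-- stated objective: alternative
-- what changed: Replaces the single-pass stack reduction by a two-phase method: filter out the ignored unit type first, then repeatedly rescan from the left deleting the leftmost adjacent reacting pair until a fixpoint; correct because leftmost pair removal preserves the stack normal form.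
import Mathlib
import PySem

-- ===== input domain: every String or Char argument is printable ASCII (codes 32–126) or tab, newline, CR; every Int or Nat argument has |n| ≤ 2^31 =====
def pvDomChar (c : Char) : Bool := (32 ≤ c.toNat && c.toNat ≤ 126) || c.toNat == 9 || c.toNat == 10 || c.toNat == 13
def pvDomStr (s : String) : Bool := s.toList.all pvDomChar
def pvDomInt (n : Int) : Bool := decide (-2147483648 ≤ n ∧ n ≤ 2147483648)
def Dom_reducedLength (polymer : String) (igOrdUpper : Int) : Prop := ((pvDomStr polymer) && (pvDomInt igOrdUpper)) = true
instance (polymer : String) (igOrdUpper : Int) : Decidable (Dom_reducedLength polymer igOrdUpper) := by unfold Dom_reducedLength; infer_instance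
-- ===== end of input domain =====

-- B replaces A's single-pass stack by filter-then-repeated-leftmost-pair-removal (alternative decomposition; not faster).

-- ===== PORT A =====
-- abs(ord(c1) - ord(c2)) == 32
def isMatch (c1 c2 : Char) : Bool :=
  ((c1.toNat : Int) - (c2.toNat : Int)).natAbs == 32

-- chr(k): exact for 0 ≤ k ≤ 0x10FFFF non-surrogate; Pre_ guarantees the range, and for a
-- surrogate k Char.ofNat yields U+0000, which never equals a Dom character, so the ≠ tests are exact.
def pyChr (k : Int) : Char := Char.ofNat k.toNat

-- the body of A's loop on the stack (stack kept in Python order, top = last)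
def stepA (stack : List Char) (c : Char) : List Char :=
  match stack.getLast? with
  | none => stack ++ [c]            -- len(stack) == 0: append
  | some t => if isMatch t c then stack.dropLast else stack ++ [c]

def reducedLength (polymer : String) (igOrdUpper : Int) : Int :=
  ((polymer.toList.foldl (fun stack c =>
    if c ≠ pyChr igOrdUpper ∧ c ≠ pyChr (igOrdUpper + 32) then stepA stack c
    else stack) []).length : Int)

-- ===== PORT B =====
-- index of the leftmost adjacent reacting pair, none if irreducible (B's inner for-loop)
def findPair : List Char → Option Nat
  | a :: b :: rest =>
    if (((a.toNat : Int) - (b.toNat : Int)).natAbs == 32) then some 0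
    else (findPair (b :: rest)).map (· + 1)
  | _ => none

theorem findPair_le {s : List Char} {i : Nat} (h : findPair s = some i) : i + 2 ≤ s.length := by
  induction s generalizing i with
  | nil => simp [findPair] at h
  | cons a t ih =>
    match t with
    | [] => simp [findPair] at h
    | b :: rest =>
      simp only [findPair] at h
      split at h
      · cases h; simp
      · rcases Option.map_eq_some_iff.mp h with ⟨j, hj, rfl⟩
        have := ih hj
        simp only [List.length_cons] at this ⊢
        omega

-- the while True loop: delete s[found:found+2] and rescan, until no pair is found
def reduceLoop (s : List Char) : List Char :=
  match h : findPair s with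
  | none => s
  | some i => reduceLoop (s.take i ++ s.drop (i + 2))
termination_by s.length
decreasing_by
  have hb := findPair_le h
  simp only [List.length_append, List.length_take, List.length_drop]
  omega

def reducedLength_alt (polymer : String) (igOrdUpper : Int) : Int :=
  ((reduceLoop (polymer.toList.filter (fun c =>
    decide (c ≠ pyChr igOrdUpper ∧ c ≠ pyChr (igOrdUpper + 32))))).length : Int)

-- ===== PRECONDITION & SPEC =====
-- Pre_: exactly the inputs where Python A returns: chr(igOrdUpper)/chr(igOrdUpper+32) are in range
-- (no ValueError), or the polymer is empty so the loop body (and chr) is never evaluated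
def Pre_reducedLength (polymer : String) (igOrdUpper : Int) : Prop :=
  polymer = "" ∨ (0 ≤ igOrdUpper ∧ igOrdUpper + 32 ≤ 0x10FFFF)
instance (polymer : String) (igOrdUpper : Int) : Decidable (Pre_reducedLength polymer igOrdUpper) := by
  unfold Pre_reducedLength; infer_instance

def pvWitness_reducedLength : String × Int := ("dabAcCaCBAcCcaDA", 67)

def Spec_reducedLength (polymer : String) (igOrdUpper : Int) (out : Int) : Prop := out = reducedLength_alt polymer igOrdUpper
instance (polymer : String) (igOrdUpper : Int) (out : Int) : Decidable (Spec_reducedLength polymer igOrdUpper out) := by unfold Spec_reducedLength; infer_instance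

-- ===== CLAIM (what is proved, stated in full; the proofs are below) =====
def Claim_equal_reducedLength : Prop := ∀ (polymer : String) (igOrdUpper : Int), Dom_reducedLength polymer igOrdUpper → Pre_reducedLength polymer igOrdUpper → Spec_reducedLength polymer igOrdUpper (reducedLength polymer igOrdUpper)

-- ===== LEMMAS AND PROOFS =====

-- the stack step on the REVERSED stack (top = head): the handy form for proofs
def rstep (r : List Char) (c : Char) : List Char :=
  match r with
  | [] => [c]
  | t :: rs => if isMatch t c then rs else c :: t :: rs

theorem stepA_reverse (r : List Char) (c : Char) :
    stepA r.reverse c = (rstep r c).reverse := by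
  cases r with
  | nil => simp [stepA, rstep]
  | cons t rs =>
    simp only [stepA, rstep, List.getLast?_reverse, List.head?_cons]
    by_cases hm : isMatch t c
    · simp [hm, List.dropLast_reverse]
    · simp [hm]

theorem stepA_eq_rstep (st : List Char) (c : Char) :
    stepA st c = (rstep st.reverse c).reverse := by
  conv_lhs => rw [← List.reverse_reverse st]
  exact stepA_reverse st.reverse c

theorem foldl_stepA_eq (xs : List Char) (st : List Char) :
    xs.foldl stepA st = (xs.foldl rstep st.reverse).reverse := by
  induction xs generalizing st with
  | nil => simp
  | cons a t ih =>
    simp only [List.foldl_cons]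
    rw [ih, stepA_eq_rstep]
    simp

-- if the whole list is pair-free after x, the reversed stack just accumulates
theorem foldl_rstep_none (s : List Char) :
    ∀ (x : Char) (r : List Char), findPair (x :: s) = none →
      s.foldl rstep (x :: r) = s.reverse ++ x :: r := by
  induction s with
  | nil => intro x r _; simp
  | cons b rest ih =>
    intro x r h
    simp only [findPair] at h
    split at h
    · exact absurd h (by simp)
    · next hm =>
      have hrec : findPair (b :: rest) = none := by
        rcases hfp : findPair (b :: rest) with _ | j
        · rfl
        · rw [hfp] at h; simp at h
      simp only [List.foldl_cons, rstep]
      rw [if_neg (by simpa [isMatch] using hm)]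
      rw [ih b (x :: r) hrec]
      simp

theorem foldl_rstep_irreducible {s : List Char} (h : findPair s = none) :
    s.foldl rstep [] = s.reverse := by
  cases s with
  | nil => simp
  | cons x t =>
    simp only [List.foldl_cons, rstep]
    simpa using foldl_rstep_none t x [] h

-- deleting the leftmost pair does not change the stack result
theorem foldl_rstep_delete (s : List Char) :
    ∀ (i : Nat) (r : List Char), findPair s = some i →
      (∀ t c rs ss, r = t :: rs → s = c :: ss → isMatch t c = false) →
      (s.take i ++ s.drop (i + 2)).foldl rstep r = s.foldl rstep r := by
  induction s with
  | nil => intro i r h _; simp [findPair] at h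
  | cons a t ih =>
    intro i r h hside
    match t with
    | [] => simp [findPair] at h
    | b :: rest =>
      simp only [findPair] at h
      split at h
      · next hm =>
        cases h
        have hm' : isMatch a b = true := by simpa [isMatch] using hm
        -- i = 0 : remove a,b; show rstep (rstep r a) b = r
        have hkey : rstep (rstep r a) b = r := by
          cases r with
          | nil => simp [rstep, hm']
          | cons tt rs =>
            have hne : isMatch tt a = false := hside tt a rs (b :: rest) rfl rfl
            simp [rstep, hne, hm']
        simp [hkey]
      · next hm =>
        rcases Option.map_eq_some_iff.mp h with ⟨j, hj, rfl⟩
        have hma : isMatch a b = false := by simpa [isMatch] using hm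
        -- after pushing a the stack top is a (the previous char never reacts with a)
        have hra : ∃ rs, rstep r a = a :: rs := by
          cases r with
          | nil => exact ⟨[], rfl⟩
          | cons tt rs =>
            have hne : isMatch tt a = false := hside tt a rs (b :: rest) rfl rfl
            exact ⟨tt :: rs, by simp [rstep, hne]⟩
        rcases hra with ⟨rs, hra⟩
        have hside' : ∀ t' c' rs' ss', rstep r a = t' :: rs' → b :: rest = c' :: ss' →
            isMatch t' c' = false := by
          intro t' c' rs' ss' ht' hs'
          rw [hra] at ht'
          cases ht'
          cases hs'
          exact hma
        have hIH := ih j (rstep r a) hj hside'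
        simp only [List.take_succ_cons, List.cons_append, List.foldl_cons]
        have h3 : j + 1 + 2 = (j + 2) + 1 := by omega
        rw [h3, List.drop_succ_cons]
        exact hIH

-- B's loop computes exactly the reversed stack reduction
theorem reduceLoop_eq (s : List Char) : reduceLoop s = (s.foldl rstep []).reverse := by
  induction s using reduceLoop.induct with
  | case1 s h =>
    rw [foldl_rstep_irreducible h, List.reverse_reverse, reduceLoop, h]
  | case2 s i h ih =>
    rw [reduceLoop]
    split
    · next heq => rw [heq] at h; cases h
    · next j heq =>
      rw [heq] at h
      cases h
      rw [ih, foldl_rstep_delete s i [] heq (by intro _ _ _ _ hc _; cases hc)]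

-- A's guarded fold over the raw string equals the plain fold over the filtered string
theorem foldl_guard_filter (P : Char → Prop) [DecidablePred P] (xs : List Char) (st : List Char) :
    xs.foldl (fun stack c => if P c then stepA stack c else stack) st
      = (xs.filter (fun c => decide (P c))).foldl stepA st := by
  induction xs generalizing st with
  | nil => simp
  | cons a t ih =>
    by_cases hp : P a
    · simp [hp, ih]
    · simp [hp, ih]

-- ===== VERDICT (by name: the statement is the Claim_ definition above) =====
theorem reducedLength_spec : Claim_equal_reducedLength := by
  intro polymer igOrdUpper _ _
  unfold Spec_reducedLength reducedLength reducedLength_alt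
  rw [foldl_guard_filter (fun c => c ≠ pyChr igOrdUpper ∧ c ≠ pyChr (igOrdUpper + 32)),
    reduceLoop_eq, foldl_stepA_eq]
  simp
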